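-- pv_equiv track=rewrite | github.com/Beat98/LHZ_QAOA_PPO | functions.py | rename_sequence
-- ===== SOURCE A (Python) =====
-- def rename_sequence(sequence):
--     mapping = {
--         'X': '\hat{\\text{X}}',
--         'C': '\hat{\\text{C}}',
--         'Z': '\hat{\\text{Z}}',
--         'A': '\hat{\\text{U}}_1',
--         'B': '\hat{\\text{U}}_2',
--         'H': '\hat{\\text{U}}_3',
--         'I': '\hat{\\text{U}}_4',
--         'J': '\hat{\\text{U}}_5',
--         'K': '\hat{\\text{U}}_6',
--         'L': '\hat{\\text{U}}_7',
--     }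
--
--     for items in mapping.items():
--         sequence = sequence.replace(items[0], items[1])
--     return sequence
-- ===== SOURCE B (Python) =====
-- def rename_sequence(sequence):
--     def tr(c):
--         if c == 'X':
--             return '\hat{\\text{X}}'
--         if c == 'C':
--             return '\hat{\\text{C}}'
--         if c == 'Z':
--             return '\hat{\\text{Z}}'
--         if c == 'A':
--             return '\hat{\\text{U}}_1'
--         if c == 'B':
--             return '\hat{\\text{U}}_2'
--         if c == 'H':
--             return '\hat{\\text{U}}_3'
--         if c == 'I':
--             return '\hat{\\text{U}}_4'
--         if c == 'J':
--             return '\hat{\\text{U}}_5'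
--         if c == 'K':
--             return '\hat{\\text{U}}_6'
--         if c == 'L':
--             return '\hat{\\text{U}}_7'
--         return c
--
--     parts = []
--     for c in sequence:
--         parts.append(tr(c))
--     return ''.join(parts)
-- ===== Notes on version B (the rewrite author's own statement) =====
-- stated objective: alternative
-- what changed: Replaces ten sequential whole-string .replace() passes driven by a dict with a single left-to-right scan that translates each character through an if-chain and accumulates the pieces in a list joined once; correct because no replacement value contains any key.
import Mathlib
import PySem

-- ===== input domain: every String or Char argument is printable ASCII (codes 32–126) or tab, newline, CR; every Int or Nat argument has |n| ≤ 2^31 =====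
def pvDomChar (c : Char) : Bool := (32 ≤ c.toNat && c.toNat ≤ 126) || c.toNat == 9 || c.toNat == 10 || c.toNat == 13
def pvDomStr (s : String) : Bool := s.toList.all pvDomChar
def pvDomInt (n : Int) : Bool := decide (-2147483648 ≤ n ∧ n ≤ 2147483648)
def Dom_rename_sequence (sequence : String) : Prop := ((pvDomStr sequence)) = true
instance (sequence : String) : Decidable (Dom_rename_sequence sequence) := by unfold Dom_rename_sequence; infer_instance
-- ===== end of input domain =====

-- B replaces A's ten sequential dict-driven whole-string .replace() passes by one scan that
-- translates each character through an if-chain and joins the accumulated pieces (same value).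

-- ===== PORT A =====
-- the mapping dict literal of A
def pvMapping : PySem.Dict String String :=
  PySem.Dict.ofList [
    ("X", "\\hat{\\text{X}}"),
    ("C", "\\hat{\\text{C}}"),
    ("Z", "\\hat{\\text{Z}}"),
    ("A", "\\hat{\\text{U}}_1"),
    ("B", "\\hat{\\text{U}}_2"),
    ("H", "\\hat{\\text{U}}_3"),
    ("I", "\\hat{\\text{U}}_4"),
    ("J", "\\hat{\\text{U}}_5"),
    ("K", "\\hat{\\text{U}}_6"),
    ("L", "\\hat{\\text{U}}_7")]

-- for items in mapping.items(): sequence = sequence.replace(items[0], items[1])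
def rename_sequence (sequence : String) : String :=
  pvMapping.items.foldl (fun seq items => PySem.Str.replace seq items.1 items.2) sequence

-- ===== PORT B =====
-- def tr(c): if c == 'X': return …; …; return c   (no dict: a plain if-chain)
def pvTr (c : Char) : String :=
  if c = 'X' then "\\hat{\\text{X}}"
  else if c = 'C' then "\\hat{\\text{C}}"
  else if c = 'Z' then "\\hat{\\text{Z}}"
  else if c = 'A' then "\\hat{\\text{U}}_1"
  else if c = 'B' then "\\hat{\\text{U}}_2"
  else if c = 'H' then "\\hat{\\text{U}}_3"
  else if c = 'I' then "\\hat{\\text{U}}_4"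
  else if c = 'J' then "\\hat{\\text{U}}_5"
  else if c = 'K' then "\\hat{\\text{U}}_6"
  else if c = 'L' then "\\hat{\\text{U}}_7"
  else String.ofList [c]

-- parts = []; for c in sequence: parts.append(tr(c)); return ''.join(parts)
def rename_sequence_alt (sequence : String) : String :=
  PySem.Str.join "" (sequence.toList.foldl (fun parts c => parts ++ [pvTr c]) [])

-- ===== PRECONDITION & SPEC =====
def Spec_rename_sequence (sequence : String) (out : String) : Prop := out = rename_sequence_alt sequence
instance (sequence : String) (out : String) : Decidable (Spec_rename_sequence sequence out) := by unfold Spec_rename_sequence; infer_instance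

-- ===== CLAIM (what is proved, stated in full; the proofs are below) =====
def Claim_equal_rename_sequence : Prop := ∀ (sequence : String), Dom_rename_sequence sequence → Spec_rename_sequence sequence (rename_sequence sequence)

-- ===== LEMMAS AND PROOFS =====

-- per-character replacement function: what s.replace(k, v) does for a one-char pattern
def pvF (k : Char) (v : List Char) (c : Char) : List Char := if c = k then v else [c]

theorem pv_go_single (k : Char) (new : List Char) :
    ∀ (fuel : Nat) (l acc : List Char), l.length ≤ fuel →
      PySem.Chars.replace.go [k] new fuel l acc = acc.reverse ++ l.flatMap (pvF k new) := by
  intro fuel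
  induction fuel with
  | zero =>
    intro l acc h
    have : l = [] := List.length_eq_zero_iff.mp (Nat.le_zero.mp h)
    subst this
    simp [PySem.Chars.replace.go]
  | succ n ih =>
    intro l acc h
    cases l with
    | nil => simp [PySem.Chars.replace.go]
    | cons c t =>
      by_cases hc : c = k
      · subst hc
        have hp : List.isPrefixOf [c] (c :: t) = true := by simp [List.isPrefixOf]
        simp only [PySem.Chars.replace.go, hp, if_pos, List.length_cons, List.length_nil,
          List.drop_succ_cons, List.drop_zero]
        rw [ih t (new.reverse ++ acc) (by simpa using Nat.le_of_succ_le_succ h)]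
        simp [pvF]
      · have hp : List.isPrefixOf [k] (c :: t) = false := by
          simp [List.isPrefixOf]; exact fun h' => absurd h'.symm hc
        simp only [PySem.Chars.replace.go, hp, Bool.false_eq_true, if_false]
        rw [ih t (c :: acc) (by simpa using Nat.le_of_succ_le_succ h)]
        simp [pvF, hc]

theorem pv_replace_single (s : List Char) (k : Char) (new : List Char) :
    PySem.Chars.replace s [k] new = s.flatMap (pvF k new) := by
  rw [PySem.Chars.replace]
  simp only [List.isEmpty_cons, Bool.false_eq_true, if_false]
  simpa using pv_go_single k new s.length s [] le_rfl

theorem pv_join_flatten (parts : List (List Char)) :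
    PySem.Chars.join [] parts = parts.flatten := by
  induction parts with
  | nil => simp [PySem.Chars.join_nil]
  | cons x xs ih =>
    cases xs with
    | nil => simp [PySem.Chars.join_singleton]
    | cons y ys => simp [PySem.Chars.join_cons_cons, ih]

theorem pv_foldl_append {α β : Type} (f : α → β) :
    ∀ (l : List α) (acc : List β),
      l.foldl (fun parts c => parts ++ [f c]) acc = acc ++ l.map f := by
  intro l
  induction l with
  | nil => simp
  | cons c t ih => intro acc; simp [ih]

theorem pv_items : pvMapping.items = [
    ("X", "\\hat{\\text{X}}"),
    ("C", "\\hat{\\text{C}}"),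
    ("Z", "\\hat{\\text{Z}}"),
    ("A", "\\hat{\\text{U}}_1"),
    ("B", "\\hat{\\text{U}}_2"),
    ("H", "\\hat{\\text{U}}_3"),
    ("I", "\\hat{\\text{U}}_4"),
    ("J", "\\hat{\\text{U}}_5"),
    ("K", "\\hat{\\text{U}}_6"),
    ("L", "\\hat{\\text{U}}_7")] := rfl

-- the ten sequential per-character passes, composed, act per character exactly like tr
theorem pv_char (c : Char) :
    (((((((((pvF 'X' "\\hat{\\text{X}}".toList c).flatMap
      (pvF 'C' "\\hat{\\text{C}}".toList)).flatMap
      (pvF 'Z' "\\hat{\\text{Z}}".toList)).flatMap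
      (pvF 'A' "\\hat{\\text{U}}_1".toList)).flatMap
      (pvF 'B' "\\hat{\\text{U}}_2".toList)).flatMap
      (pvF 'H' "\\hat{\\text{U}}_3".toList)).flatMap
      (pvF 'I' "\\hat{\\text{U}}_4".toList)).flatMap
      (pvF 'J' "\\hat{\\text{U}}_5".toList)).flatMap
      (pvF 'K' "\\hat{\\text{U}}_6".toList)).flatMap
      (pvF 'L' "\\hat{\\text{U}}_7".toList)
      = (pvTr c).toList := by
  by_cases hX : c = 'X'; · subst hX; decide
  by_cases hC : c = 'C'; · subst hC; decide
  by_cases hZ : c = 'Z'; · subst hZ; decide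
  by_cases hA : c = 'A'; · subst hA; decide
  by_cases hB : c = 'B'; · subst hB; decide
  by_cases hH : c = 'H'; · subst hH; decide
  by_cases hI : c = 'I'; · subst hI; decide
  by_cases hJ : c = 'J'; · subst hJ; decide
  by_cases hK : c = 'K'; · subst hK; decide
  by_cases hL : c = 'L'; · subst hL; decide
  simp [pvF, pvTr, hX, hC, hZ, hA, hB, hH, hI, hJ, hK, hL]

theorem pv_list (l : List Char) :
    (((((((((l.flatMap (pvF 'X' "\\hat{\\text{X}}".toList)).flatMap
      (pvF 'C' "\\hat{\\text{C}}".toList)).flatMap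
      (pvF 'Z' "\\hat{\\text{Z}}".toList)).flatMap
      (pvF 'A' "\\hat{\\text{U}}_1".toList)).flatMap
      (pvF 'B' "\\hat{\\text{U}}_2".toList)).flatMap
      (pvF 'H' "\\hat{\\text{U}}_3".toList)).flatMap
      (pvF 'I' "\\hat{\\text{U}}_4".toList)).flatMap
      (pvF 'J' "\\hat{\\text{U}}_5".toList)).flatMap
      (pvF 'K' "\\hat{\\text{U}}_6".toList)).flatMap
      (pvF 'L' "\\hat{\\text{U}}_7".toList)
      = l.flatMap (fun c => (pvTr c).toList) := by
  induction l with
  | nil => simp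
  | cons c t ih =>
    simp only [List.flatMap_cons, List.flatMap_append]
    rw [ih, pv_char c]

-- ===== VERDICT (by name: the statement is the Claim_ definition above) =====
set_option maxHeartbeats 2000000 in
theorem rename_sequence_spec : Claim_equal_rename_sequence := by
  intro s _
  unfold Spec_rename_sequence rename_sequence rename_sequence_alt
  rw [pv_items]
  simp only [List.foldl_cons, List.foldl_nil]
  rw [pv_foldl_append pvTr s.toList []]
  rw [← String.toList_inj]
  simp only [PySem.Str.toList_replace, PySem.Str.toList_join]
  rw [show ("X" : String).toList = ['X']  from by decide, show ("C" : String).toList = ['C']  from by decide,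
    show ("Z" : String).toList = ['Z']  from by decide, show ("A" : String).toList = ['A']  from by decide,
    show ("B" : String).toList = ['B']  from by decide, show ("H" : String).toList = ['H']  from by decide,
    show ("I" : String).toList = ['I']  from by decide, show ("J" : String).toList = ['J']  from by decide,
    show ("K" : String).toList = ['K']  from by decide, show ("L" : String).toList = ['L']  from by decide,
    show ("" : String).toList = []  from by decide]
  simp only [pv_replace_single]
  rw [pv_list s.toList, List.nil_append, List.map_map, pv_join_flatten, ← List.flatMap_def]
  exact List.flatMap_congr (fun c _ => rfl)
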